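-- pv_equiv track=rewrite | github.com/yslmoment/Algorithm | chapter6/stable_counting_sort.py | stable_counting_sort_by_y
-- ===== SOURCE A (Python) =====
-- def stable_counting_sort_by_y(coords):
--     MAX_Y = max(coords, key=lambda x: x[1])[1] + 1  # y의 최대값을 구하고 +1
--     output = [None] * len(coords)  # 정렬 결과를 저장할 리스트
--     count = [0] * MAX_Y  # y 값을 카운트할 배열
--
--     # y 값을 카운트
--     for _, y in coords:
--         count[y] += 1
--
--     # 누적 합을 계산
--     for i in range(1, MAX_Y):
--         count[i] += count[i - 1]
--
--     # 입력 배열을 순회하며 각 요소를 출력 배열에 올바른 위치에 배치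
--     for x, y in reversed(coords):  # 뒤에서부터 순회하면서 안정성 유지
--         output[count[y] - 1] = (x, y)
--         count[y] -= 1  # 사용된 위치는 감소
--
--     return output
-- ===== SOURCE B (Python) =====
-- def stable_counting_sort_by_y(coords):
--     MAX_Y = max(coords, key=lambda x: x[1])[1] + 1
--     buckets = [[] for _ in range(MAX_Y)]
--     for x, y in coords:
--         buckets[y].append((x, y))
--     return [p for bucket in buckets for p in bucket]
-- ===== Notes on version B (the rewrite author's own statement) =====
-- stated objective: simpler
-- what changed: Replaces the count array, prefix-sum pass and reverse placement into a preallocated output with a single forward pass distributing pairs into per-y buckets that are flattened in index order.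
import Mathlib
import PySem

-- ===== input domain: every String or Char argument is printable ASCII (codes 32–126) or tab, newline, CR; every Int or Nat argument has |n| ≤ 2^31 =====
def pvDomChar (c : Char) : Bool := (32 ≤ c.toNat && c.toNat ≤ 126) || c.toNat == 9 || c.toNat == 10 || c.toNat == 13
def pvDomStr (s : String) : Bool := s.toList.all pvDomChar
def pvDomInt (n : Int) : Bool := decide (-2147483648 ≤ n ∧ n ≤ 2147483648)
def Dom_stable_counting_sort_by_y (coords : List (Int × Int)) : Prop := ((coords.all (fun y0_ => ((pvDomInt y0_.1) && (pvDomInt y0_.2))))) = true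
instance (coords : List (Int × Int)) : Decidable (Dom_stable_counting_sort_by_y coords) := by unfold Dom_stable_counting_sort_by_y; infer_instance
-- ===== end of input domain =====

-- B replaces A's count array + prefix-sum pass + reverse placement with forward bucket
-- distribution and in-order flattening (objective: simpler; same asymptotic cost).

-- ===== PORT A =====
-- loop body of A's placement loop ('for x, y in reversed(coords): output[count[y]-1] = (x,y); count[y] -= 1')
def pvStepA (st : List (Int × Int) × List Int) (p : Int × Int) : List (Int × Int) × List Int :=
  (PySem.List.pySetD st.1 (PySem.List.pyGetD st.2 p.2 0 - 1) p,
   PySem.List.pySetD st.2 p.2 (PySem.List.pyGetD st.2 p.2 0 - 1))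

def stable_counting_sort_by_y (coords : List (Int × Int)) : List (Int × Int) :=
  match PySem.List.max? coords (fun p => p.2) with
  | none => []  -- Python: max() raises ValueError on empty input (excluded by Pre_)
  | some m =>
    let MAX_Y : Int := m.2 + 1
    -- 'output = [None] * len(coords)': under Pre_ every cell is overwritten before return,
    -- so the placeholder is seeded with (0, 0)
    let output0 : List (Int × Int) := List.replicate coords.length ((0 : Int), (0 : Int))
    let count0 : List Int := List.replicate MAX_Y.toNat 0
    let count1 := coords.foldl
      (fun c p => PySem.List.pySetD c p.2 (PySem.List.pyGetD c p.2 0 + 1)) count0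
    let count2 := (PySem.List.pyRange 1 MAX_Y).foldl
      (fun c i => PySem.List.pySetD c i (PySem.List.pyGetD c i 0 + PySem.List.pyGetD c (i - 1) 0)) count1
    (coords.reverse.foldl pvStepA (output0, count2)).1

-- ===== PORT B =====
def stable_counting_sort_by_y_alt (coords : List (Int × Int)) : List (Int × Int) :=
  match PySem.List.max? coords (fun p => p.2) with
  | none => []  -- Python: max() raises ValueError on empty input (excluded by Pre_)
  | some m =>
    let MAX_Y : Int := m.2 + 1
    let buckets0 : List (List (Int × Int)) := List.replicate MAX_Y.toNat []
    let buckets := coords.foldl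
      (fun bs p => PySem.List.pySetD bs p.2 (PySem.List.pyGetD bs p.2 [] ++ [p])) buckets0
    buckets.flatten

-- ===== PRECONDITION & SPEC =====
-- Pre_ excludes exactly the inputs where BOTH programs raise: the empty list (ValueError from
-- max()) and lists containing some y < -(max_y + 1) (IndexError from count[y] / buckets[y]).
-- '∃ q ∈ coords, -(q.2+1) ≤ p.2' says p.2 ≥ -(max_y + 1) without computing the max.
def Pre_stable_counting_sort_by_y (coords : List (Int × Int)) : Prop :=
  coords ≠ [] ∧ ∀ p ∈ coords, ∃ q ∈ coords, -(q.2 + 1) ≤ p.2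
instance (coords : List (Int × Int)) : Decidable (Pre_stable_counting_sort_by_y coords) := by
  unfold Pre_stable_counting_sort_by_y; infer_instance

def pvWitness_stable_counting_sort_by_y : (List (Int × Int)) := [((1 : Int), (2 : Int)), ((3 : Int), (0 : Int))]

def Spec_stable_counting_sort_by_y (coords : List (Int × Int)) (out : List (Int × Int)) : Prop := out = stable_counting_sort_by_y_alt coords
instance (coords : List (Int × Int)) (out : List (Int × Int)) : Decidable (Spec_stable_counting_sort_by_y coords out) := by unfold Spec_stable_counting_sort_by_y; infer_instance

-- ===== CLAIM (what is proved, stated in full; the proofs are below) =====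
def Claim_equal_stable_counting_sort_by_y : Prop := ∀ (coords : List (Int × Int)), Dom_stable_counting_sort_by_y coords → Pre_stable_counting_sort_by_y coords → Spec_stable_counting_sort_by_y coords (stable_counting_sort_by_y coords)

-- ===== LEMMAS AND PROOFS =====

-- Python's wrapped index into a list of length M (valid for -M ≤ y < M)
def pvSlot (M : Nat) (y : Int) : Nat := if 0 ≤ y then y.toNat else M - (-y).toNat

def pvCnt (M : Nat) (s : Nat) (l : List (Int × Int)) : Nat :=
  l.countP (fun p => pvSlot M p.2 == s)

def pvBucket (M : Nat) (s : Nat) (l : List (Int × Int)) : List (Int × Int) :=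
  l.filter (fun p => pvSlot M p.2 == s)

def pvC (M : Nat) (l : List (Int × Int)) (s : Nat) : Nat :=
  ((List.range s).map (fun t => pvCnt M t l)).sum

theorem pvSlot_lt (M : Nat) (y : Int) (h1 : -(M : Int) ≤ y) (h2 : y < (M : Int)) (hM : 0 < M) :
    pvSlot M y < M := by
  unfold pvSlot; split_ifs with h
  · omega
  · omega

theorem pvIdx_wrap (n : Nat) (y : Int) (h1 : -(n : Int) ≤ y) (h2 : y < (n : Int)) :
    PySem.List.pyIdx? n y = some (pvSlot n y) := by
  simp [PySem.List.pyIdx?, pvSlot]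
  split_ifs with h
  · simp
  · simp

theorem pvGetD_wrap {α : Type} (xs : List α) (y : Int) (d : α)
    (h1 : -(xs.length : Int) ≤ y) (h2 : y < (xs.length : Int)) :
    PySem.List.pyGetD xs y d = xs.getD (pvSlot xs.length y) d := by
  have hlt : pvSlot xs.length y < xs.length := by
    apply pvSlot_lt <;> omega
  simp [PySem.List.pyGetD, PySem.List.pyGet?, pvIdx_wrap _ _ h1 h2, List.getD]

theorem pvSetD_wrap {α : Type} (xs : List α) (y : Int) (v : α)
    (h1 : -(xs.length : Int) ≤ y) (h2 : y < (xs.length : Int)) :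
    PySem.List.pySetD xs y v = xs.set (pvSlot xs.length y) v := by
  simp [PySem.List.pySetD, PySem.List.pySet?, pvIdx_wrap _ _ h1 h2]


-- characterization of B's distribution loop
theorem pvL1 (M : Nat) (hM : 0 < M) :
    ∀ (l : List (Int × Int)) (bs : List (List (Int × Int))), bs.length = M →
    (∀ p ∈ l, -(M : Int) ≤ p.2 ∧ p.2 < (M : Int)) →
    (l.foldl (fun bs p => PySem.List.pySetD bs p.2 (PySem.List.pyGetD bs p.2 [] ++ [p])) bs).length = M ∧
    ∀ s, s < M →
      (l.foldl (fun bs p => PySem.List.pySetD bs p.2 (PySem.List.pyGetD bs p.2 [] ++ [p])) bs).getD s [] =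
        bs.getD s [] ++ pvBucket M s l := by
  intro l
  induction l with
  | nil => intro bs hlen hy; exact ⟨hlen, fun s hs => by simp [pvBucket]⟩
  | cons p l ih =>
    intro bs hlen hy
    have hyp := hy p (by simp)
    have h1 : -(bs.length : Int) ≤ p.2 := by rw [hlen]; exact hyp.1
    have h2 : p.2 < (bs.length : Int) := by rw [hlen]; exact hyp.2
    have hslt : pvSlot M p.2 < M := pvSlot_lt M p.2 hyp.1 hyp.2 hM
    have hstep : PySem.List.pySetD bs p.2 (PySem.List.pyGetD bs p.2 [] ++ [p]) =
        bs.set (pvSlot M p.2) (bs.getD (pvSlot M p.2) [] ++ [p]) := by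
      rw [pvSetD_wrap bs p.2 _ h1 h2, pvGetD_wrap bs p.2 _ h1 h2, hlen]
    simp only [List.foldl_cons, hstep]
    obtain ⟨ihl, ihv⟩ := ih (bs.set (pvSlot M p.2) (bs.getD (pvSlot M p.2) [] ++ [p]))
      (by simp [hlen]) (fun q hq => hy q (by simp [hq]))
    refine ⟨ihl, fun s hs => ?_⟩
    rw [ihv s hs]
    by_cases hcase : pvSlot M p.2 = s
    · subst hcase
      rw [List.getD_eq_getElem?_getD, List.getElem?_set_self (by omega), Option.getD_some]
      simp [pvBucket, List.filter_cons]
    · rw [List.getD_eq_getElem?_getD, List.getElem?_set_ne hcase]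
      have hne : (pvSlot M p.2 == s) = false := by simp [hcase]
      simp [pvBucket, List.filter_cons, hne, ← List.getD_eq_getElem?_getD]

-- characterization of A's counting loop
theorem pvL2 (M : Nat) (hM : 0 < M) :
    ∀ (l : List (Int × Int)) (c : List Int), c.length = M →
    (∀ p ∈ l, -(M : Int) ≤ p.2 ∧ p.2 < (M : Int)) →
    (l.foldl (fun c p => PySem.List.pySetD c p.2 (PySem.List.pyGetD c p.2 0 + 1)) c).length = M ∧
    ∀ s, s < M →
      (l.foldl (fun c p => PySem.List.pySetD c p.2 (PySem.List.pyGetD c p.2 0 + 1)) c).getD s 0 =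
        c.getD s 0 + pvCnt M s l := by
  intro l
  induction l with
  | nil => intro c hlen hy; exact ⟨hlen, fun s hs => by simp [pvCnt]⟩
  | cons p l ih =>
    intro c hlen hy
    have hyp := hy p (by simp)
    have h1 : -(c.length : Int) ≤ p.2 := by rw [hlen]; exact hyp.1
    have h2 : p.2 < (c.length : Int) := by rw [hlen]; exact hyp.2
    have hstep : PySem.List.pySetD c p.2 (PySem.List.pyGetD c p.2 0 + 1) =
        c.set (pvSlot M p.2) (c.getD (pvSlot M p.2) 0 + 1) := by
      rw [pvSetD_wrap c p.2 _ h1 h2, pvGetD_wrap c p.2 _ h1 h2, hlen]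
    simp only [List.foldl_cons, hstep]
    obtain ⟨ihl, ihv⟩ := ih (c.set (pvSlot M p.2) (c.getD (pvSlot M p.2) 0 + 1))
      (by simp [hlen]) (fun q hq => hy q (by simp [hq]))
    refine ⟨ihl, fun s hs => ?_⟩
    rw [ihv s hs]
    by_cases hcase : pvSlot M p.2 = s
    · subst hcase
      rw [List.getD_eq_getElem?_getD, List.getElem?_set_self (by omega), Option.getD_some]
      simp [pvCnt, List.countP_cons, ← List.getD_eq_getElem?_getD]
      push_cast; ring
    · rw [List.getD_eq_getElem?_getD, List.getElem?_set_ne hcase]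
      have hne : (pvSlot M p.2 == s) = false := by simp [hcase]
      simp [pvCnt, List.countP_cons, hne, ← List.getD_eq_getElem?_getD]

-- characterization of A's prefix-sum loop (over range(1, k))
theorem pvL3 (c : List Int) :
    ∀ (k : Nat), k ≤ c.length →
    ((PySem.List.pyRange 1 (k : Int)).foldl
        (fun c i => PySem.List.pySetD c i (PySem.List.pyGetD c i 0 + PySem.List.pyGetD c (i - 1) 0)) c).length
      = c.length ∧
    (∀ s, s < k →
      ((PySem.List.pyRange 1 (k : Int)).foldl
        (fun c i => PySem.List.pySetD c i (PySem.List.pyGetD c i 0 + PySem.List.pyGetD c (i - 1) 0)) c).getD s 0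
      = ((List.range (s + 1)).map (fun t => c.getD t 0)).sum) ∧
    (∀ s, k ≤ s →
      ((PySem.List.pyRange 1 (k : Int)).foldl
        (fun c i => PySem.List.pySetD c i (PySem.List.pyGetD c i 0 + PySem.List.pyGetD c (i - 1) 0)) c).getD s 0
      = c.getD s 0) := by
  intro k
  induction k with
  | zero =>
    intro _
    rw [PySem.List.pyRange_one_eq_nil (by norm_num)]
    exact ⟨rfl, fun s hs => by omega, fun s _ => rfl⟩
  | succ k ih =>
    intro hk
    by_cases hk0 : k = 0
    · subst hk0
      have h01 : (((0 : Nat) + 1 : Nat) : Int) = 1 := by norm_num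
      rw [h01, PySem.List.pyRange_one_eq_nil (le_refl 1)]
      refine ⟨rfl, fun s hs => ?_, fun s _ => rfl⟩
      interval_cases s
      simp
    · obtain ⟨ihl, ihin, ihout⟩ := ih (by omega)
      have hsplit : PySem.List.pyRange 1 ((k : Int) + 1) = PySem.List.pyRange 1 (k : Int) ++ [(k : Int)] := by
        exact PySem.List.pyRange_one_succ_right (by omega)
      set f := (fun (c : List Int) (i : Int) => PySem.List.pySetD c i (PySem.List.pyGetD c i 0 + PySem.List.pyGetD c (i - 1) 0)) with hf
      have hcast : ((k + 1 : Nat) : Int) = (k : Int) + 1 := by push_cast; ring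
      rw [hcast, hsplit, List.foldl_append]
      set mid := (PySem.List.pyRange 1 (k : Int)).foldl f c with hmid
      simp only [List.foldl_cons, List.foldl_nil]
      -- the one step at index k
      have hklen : k < mid.length := by omega
      have hkm1 : k - 1 < k := by omega
      have hget1 : PySem.List.pyGetD mid (k : Int) 0 = mid.getD k 0 := by
        rw [pvGetD_wrap mid (k : Int) 0 (by omega) (by omega)]
        congr 1
      have hget2 : PySem.List.pyGetD mid ((k : Int) - 1) 0 = mid.getD (k - 1) 0 := by
        rw [pvGetD_wrap mid ((k : Int) - 1) 0 (by omega) (by omega)]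
        congr 1
        simp [pvSlot]
        omega
      have hset : f mid (k : Int) = mid.set k (mid.getD k 0 + mid.getD (k - 1) 0) := by
        rw [hf]
        simp only
        rw [pvSetD_wrap mid (k : Int) _ (by omega) (by omega), hget1, hget2]
        congr 1
      rw [hset]
      have hvalk : mid.getD k 0 = c.getD k 0 := ihout k (le_refl k)
      have hvalkm : mid.getD (k - 1) 0 = ((List.range (k - 1 + 1)).map (fun t => c.getD t 0)).sum :=
        ihin (k - 1) hkm1
      refine ⟨by simp [ihl], fun s hs => ?_, fun s hsk => ?_⟩
      · by_cases hcase : s = k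
        · subst hcase
          rw [List.getD_eq_getElem?_getD, List.getElem?_set_self (by omega), Option.getD_some,
            hvalk, hvalkm]
          have : s - 1 + 1 = s := by omega
          rw [this, List.range_succ, List.map_append, List.sum_append]
          simp [add_comm]
        · rw [List.getD_eq_getElem?_getD, List.getElem?_set_ne (by omega),
            ← List.getD_eq_getElem?_getD]
          exact ihin s (by omega)
      · rw [List.getD_eq_getElem?_getD, List.getElem?_set_ne (by omega),
          ← List.getD_eq_getElem?_getD]
        exact ihout s (by omega)


-- characterization of A's reverse placement loop: with c s = D s + (#slot-s elements of r),
-- disjoint in-range destination segments [D s, D s + cnt s), the loop writes bucket s of r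
-- (in order) into segment s and touches nothing else.
theorem pvL4 (M : Nat) (hM : 0 < M) :
    ∀ (r : List (Int × Int)) (out : List (Int × Int)) (c : List Int) (D : Nat → Int),
    c.length = M →
    (∀ p ∈ r, -(M : Int) ≤ p.2 ∧ p.2 < (M : Int)) →
    (∀ s, s < M → c.getD s 0 = D s + pvCnt M s r) →
    (∀ s t, s < M → t < M → s ≠ t →
      ∀ i : Int, ¬(D s ≤ i ∧ i < D s + pvCnt M s r ∧ D t ≤ i ∧ i < D t + pvCnt M t r)) →
    (∀ s, s < M → 0 < pvCnt M s r → 0 ≤ D s ∧ D s + pvCnt M s r ≤ (out.length : Int)) →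
    (r.reverse.foldl pvStepA (out, c)).2.length = M ∧
    (r.reverse.foldl pvStepA (out, c)).1.length = out.length ∧
    (∀ s, s < M → (r.reverse.foldl pvStepA (out, c)).2.getD s 0 = D s) ∧
    (∀ s, s < M → ∀ j : Nat, j < pvCnt M s r →
      (r.reverse.foldl pvStepA (out, c)).1.getD (D s + j).toNat ((0 : Int), (0 : Int)) =
        (pvBucket M s r).getD j ((0 : Int), (0 : Int))) ∧
    (∀ i : Nat, i < out.length →
      (∀ s, s < M → ¬(D s ≤ (i : Int) ∧ (i : Int) < D s + pvCnt M s r)) →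
      (r.reverse.foldl pvStepA (out, c)).1.getD i ((0 : Int), (0 : Int)) =
        out.getD i ((0 : Int), (0 : Int))) := by
  intro r
  induction r with
  | nil =>
    intro out c D hlen hy hc hdisj hrange
    refine ⟨hlen, rfl, fun s hs => ?_, fun s hs j hj => by simp [pvCnt] at hj, fun i _ _ => rfl⟩
    have := hc s hs
    simp [pvCnt] at this
    simpa using this
  | cons p r ih =>
    intro out c D hlen hy hc hdisj hrange
    have hyp := hy p (by simp)
    have hslt : pvSlot M p.2 < M := pvSlot_lt M p.2 hyp.1 hyp.2 hM
    -- counts relation for p :: r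
    have hcnt_cons : ∀ s, pvCnt M s (p :: r) = pvCnt M s r + (if s = pvSlot M p.2 then 1 else 0) := by
      intro s
      unfold pvCnt
      rw [List.countP_cons]
      by_cases h : s = pvSlot M p.2
      · have hb : (pvSlot M p.2 == s) = true := by simp [h]
        simp [hb, h]
      · have hb : (pvSlot M p.2 == s) = false := by
          simp only [beq_eq_false_iff_ne, ne_eq]
          exact fun hh => h hh.symm
        simp [hb, h]
    set D' : Nat → Int := fun s => D s + (if s = pvSlot M p.2 then 1 else 0) with hD'
    have hcntp : 0 < pvCnt M (pvSlot M p.2) (p :: r) := by rw [hcnt_cons]; simp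
    have hDsp := hrange (pvSlot M p.2) hslt hcntp
    -- apply IH to r with D'
    obtain ⟨ih2len, ih1len, ihcnt, ihseg, ihoth⟩ := ih out c D' hlen
      (fun q hq => hy q (by simp [hq]))
      (fun s hs => by
        rw [hc s hs, hcnt_cons s, hD']
        push_cast
        split_ifs <;> ring)
      (fun s t hs ht hne i hcontra => by
        obtain ⟨h1, h2, h3, h4⟩ := hcontra
        refine hdisj s t hs ht hne i ?_
        rw [hcnt_cons s, hcnt_cons t]
        rw [hD'] at h1 h2 h3 h4
        simp only at h1 h2 h3 h4
        push_cast at h1 h2 h3 h4 ⊢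
        split_ifs at h1 h2 h3 h4 ⊢ <;> omega)
      (fun s hs hpos => by
        have hpos' : 0 < pvCnt M s (p :: r) := by rw [hcnt_cons s]; omega
        obtain ⟨ha, hb⟩ := hrange s hs hpos'
        rw [hcnt_cons s] at hb
        rw [hD']
        simp only
        push_cast at hb ⊢
        split_ifs at hb ⊢ <;> constructor <;> omega)
    -- unfold the final step
    have hfold : (p :: r).reverse.foldl pvStepA (out, c) =
        pvStepA (r.reverse.foldl pvStepA (out, c)) p := by
      simp [List.foldl_append]
    set st := r.reverse.foldl pvStepA (out, c) with hst
    -- the read of count[y]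
    have hb1 : -(st.2.length : Int) ≤ p.2 := by rw [ih2len]; exact hyp.1
    have hb2 : p.2 < (st.2.length : Int) := by rw [ih2len]; exact hyp.2
    have hcread : PySem.List.pyGetD st.2 p.2 0 = D (pvSlot M p.2) + 1 := by
      rw [pvGetD_wrap st.2 p.2 0 hb1 hb2]
      have hsl : pvSlot st.2.length p.2 = pvSlot M p.2 := by rw [ih2len]
      rw [hsl, ihcnt (pvSlot M p.2) hslt, hD']
      simp
    have hDsp0 : 0 ≤ D (pvSlot M p.2) := hDsp.1
    have hDsplt : D (pvSlot M p.2) < (out.length : Int) := by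
      have h2 := hDsp.2
      have h3 : (1 : Int) ≤ (pvCnt M (pvSlot M p.2) (p :: r) : Int) := by exact_mod_cast hcntp
      omega
    have hwrite : (pvStepA st p).1 = st.1.set (D (pvSlot M p.2)).toNat p := by
      unfold pvStepA
      rw [hcread, show D (pvSlot M p.2) + 1 - 1 = D (pvSlot M p.2) by ring,
        PySem.List.pySetD_of_nonneg _ _ hDsp0]
    have hcwrite : (pvStepA st p).2 = st.2.set (pvSlot M p.2) (D (pvSlot M p.2)) := by
      unfold pvStepA
      rw [hcread, show D (pvSlot M p.2) + 1 - 1 = D (pvSlot M p.2) by ring,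
        pvSetD_wrap st.2 p.2 _ hb1 hb2]
      rw [ih2len]
    have hwlen : (pvStepA st p).1.length = out.length := by rw [hwrite]; simp [ih1len]
    rw [hfold]
    refine ⟨by rw [hcwrite]; simp [ih2len], hwlen, fun s hs => ?_, fun s hs j hj => ?_, fun i hi hout => ?_⟩
    · rw [hcwrite]
      by_cases h : s = pvSlot M p.2
      · subst h
        rw [List.getD_eq_getElem?_getD, List.getElem?_set_self (by omega), Option.getD_some]
      · rw [List.getD_eq_getElem?_getD, List.getElem?_set_ne (fun hh => h hh.symm),
          ← List.getD_eq_getElem?_getD, ihcnt s hs, hD']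
        simp [h]
    · -- segment values
      rw [hwrite]
      by_cases h : s = pvSlot M p.2
      · subst h
        rcases Nat.eq_zero_or_pos j with hj0 | hjpos
        · subst hj0
          rw [show ((D (pvSlot M p.2) + ((0 : Nat) : Int))) = D (pvSlot M p.2) by simp]
          rw [List.getD_eq_getElem?_getD, List.getElem?_set_self (by rw [ih1len]; omega),
            Option.getD_some]
          have hbk : pvBucket M (pvSlot M p.2) (p :: r) = p :: pvBucket M (pvSlot M p.2) r := by
            simp [pvBucket, List.filter_cons]
          rw [hbk]; rfl
        · have hne : (D (pvSlot M p.2) + (j : Int)).toNat ≠ (D (pvSlot M p.2)).toNat := by omega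
          rw [List.getD_eq_getElem?_getD, List.getElem?_set_ne (fun hh => hne hh.symm),
            ← List.getD_eq_getElem?_getD]
          have hj' : j - 1 < pvCnt M (pvSlot M p.2) r := by
            rw [hcnt_cons] at hj; simp at hj; omega
          have hseg := ihseg (pvSlot M p.2) hslt (j - 1) hj'
          rw [hD'] at hseg
          simp only [reduceIte] at hseg
          have harith : (D (pvSlot M p.2) + 1 + ((j - 1 : Nat) : Int)).toNat
              = (D (pvSlot M p.2) + (j : Int)).toNat := by omega
          rw [harith] at hseg
          rw [hseg]
          have hbk : pvBucket M (pvSlot M p.2) (p :: r) = p :: pvBucket M (pvSlot M p.2) r := by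
            simp [pvBucket, List.filter_cons]
          rw [hbk]
          rcases j with _ | j'
          · omega
          · simp
      · -- s ≠ slot p : position differs from the write position
        have hj'' : j < pvCnt M s r := by
          rw [hcnt_cons] at hj; simp [h] at hj; omega
        have hDs := hrange s hs (by rw [hcnt_cons]; omega)
        have hne : (D s + (j : Int)).toNat ≠ (D (pvSlot M p.2)).toNat := by
          intro heq
          have h3 : (1 : Int) ≤ (pvCnt M (pvSlot M p.2) (p :: r) : Int) := by exact_mod_cast hcntp
          have hjc : ((j : Int)) < pvCnt M s (p :: r) := by
            rw [hcnt_cons s]; push_cast; simp [h]; exact_mod_cast hj''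
          refine hdisj s (pvSlot M p.2) hs hslt h (D (pvSlot M p.2))
            ⟨by omega, by omega, le_refl _, by omega⟩
        rw [List.getD_eq_getElem?_getD, List.getElem?_set_ne (fun hh => hne hh.symm),
          ← List.getD_eq_getElem?_getD]
        have hseg := ihseg s hs j hj''
        rw [hD'] at hseg
        simp only [if_neg h, add_zero] at hseg
        rw [hseg]
        have hbk : pvBucket M s (p :: r) = pvBucket M s r := by
          have hbf : (pvSlot M p.2 == s) = false := by
            simp only [beq_eq_false_iff_ne, ne_eq]
            exact fun hh => h hh.symm
          simp [pvBucket, List.filter_cons, hbf]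
        rw [hbk]
    · -- untouched positions
      rw [hwrite]
      have hne : (i : Int) ≠ D (pvSlot M p.2) := by
        intro heq
        have h3 : (1 : Int) ≤ (pvCnt M (pvSlot M p.2) (p :: r) : Int) := by exact_mod_cast hcntp
        exact hout (pvSlot M p.2) hslt ⟨by omega, by omega⟩
      have hne' : i ≠ (D (pvSlot M p.2)).toNat := by omega
      rw [List.getD_eq_getElem?_getD, List.getElem?_set_ne (fun hh => hne' hh.symm),
        ← List.getD_eq_getElem?_getD]
      refine ihoth i hi (fun s hs hcontra => ?_)
      rw [hD'] at hcontra
      simp only at hcontra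
      refine hout s hs ?_
      have hc1 := hcontra.1
      have hc2 := hcontra.2
      rw [hcnt_cons s]
      push_cast at hc1 hc2 ⊢
      split_ifs at hc1 hc2 ⊢ <;> omega


theorem pvCnt_eq_len (M s : Nat) (l : List (Int × Int)) :
    pvCnt M s l = (pvBucket M s l).length := by
  simp [pvCnt, pvBucket, List.countP_eq_length_filter]

theorem pvC_succ (M : Nat) (l : List (Int × Int)) (s : Nat) :
    pvC M l (s + 1) = pvC M l s + pvCnt M s l := by
  simp [pvC, List.range_succ]

theorem pvC_mono (M : Nat) (l : List (Int × Int)) : ∀ {a b : Nat}, a ≤ b → pvC M l a ≤ pvC M l b := by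
  intro a b hab
  induction b, hab using Nat.le_induction with
  | base => exact le_refl _
  | succ b hb ih => rw [pvC_succ]; omega

theorem pvSumInd_zero (a : Nat) : ∀ (n : Nat), n ≤ a →
    ((List.range n).map (fun t => if a = t then 1 else 0)).sum = 0 := by
  intro n
  induction n with
  | zero => intro _; simp
  | succ n ih =>
    intro h
    rw [List.range_succ, List.map_append, List.sum_append, ih (by omega)]
    simp
    omega

theorem pvSumInd_one (a : Nat) : ∀ (n : Nat), a < n →
    ((List.range n).map (fun t => if a = t then 1 else 0)).sum = 1 := by
  intro n
  induction n with
  | zero => omega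
  | succ n ih =>
    intro h
    rw [List.range_succ, List.map_append, List.sum_append]
    by_cases hcase : a = n
    · subst hcase
      rw [pvSumInd_zero a a (le_refl a)]
      simp
    · rw [ih (by omega)]
      simp [hcase]

theorem pvC_cons (M : Nat) (p : Int × Int) (l : List (Int × Int)) (s : Nat) :
    pvC M (p :: l) s = pvC M l s
      + ((List.range s).map (fun t => if pvSlot M p.2 = t then 1 else 0)).sum := by
  unfold pvC
  induction s with
  | zero => simp
  | succ s ih =>
    rw [List.range_succ]
    simp only [List.map_append, List.sum_append, ih]
    have : pvCnt M s (p :: l) = pvCnt M s l + (if pvSlot M p.2 = s then 1 else 0) := by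
      unfold pvCnt
      rw [List.countP_cons]
      by_cases h : pvSlot M p.2 = s
      · simp [h]
      · have hb : (pvSlot M p.2 == s) = false := by
          simp only [beq_eq_false_iff_ne, ne_eq]; exact h
        simp [hb, h]
    simp [this]
    omega

theorem pvSumCnt (M : Nat) : ∀ (l : List (Int × Int)), (∀ p ∈ l, pvSlot M p.2 < M) →
    pvC M l M = l.length := by
  intro l
  induction l with
  | nil => intro _; simp [pvC, pvCnt]
  | cons p l ih =>
    intro h
    rw [pvC_cons, ih (fun q hq => h q (by simp [hq])),
      pvSumInd_one (pvSlot M p.2) M (h p (by simp))]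
    simp

theorem pvFlattenSeg {α : Type} : ∀ (L : List (List α)) (xs : List α),
    xs.length = (L.map List.length).sum →
    (∀ k, k < L.length →
      (xs.drop (((L.take k).map List.length).sum)).take (L.getD k []).length = L.getD k []) →
    xs = L.flatten := by
  intro L
  induction L with
  | nil => intro xs hlen _; simpa using List.eq_nil_of_length_eq_zero (by simpa using hlen)
  | cons b L ih =>
    intro xs hlen hseg
    have hseg0 := hseg 0 (by simp)
    simp only [List.take_zero, List.map_nil, List.sum_nil, List.drop_zero, List.getD_cons_zero] at hseg0
    have hblen : b.length ≤ xs.length := by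
      rw [hlen]; simp
    have hrest : xs.drop b.length = L.flatten := by
      apply ih
      · rw [List.length_drop, hlen]; simp
      · intro k hk
        have := hseg (k + 1) (by simpa using hk)
        simp only [List.take_succ_cons, List.map_cons, List.sum_cons, List.getD_cons_succ] at this
        rw [List.drop_drop]
        exact this
    calc xs = xs.take b.length ++ xs.drop b.length := (List.take_append_drop _ _).symm
      _ = b ++ L.flatten := by rw [hseg0, hrest]
      _ = (b :: L).flatten := by simp

-- ===== VERDICT (by name: the statement is the Claim_ definition above) =====
theorem pvCastSum (l : List Nat) : (l.map (Nat.cast : Nat → Int)).sum = (l.sum : Int) := by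
  induction l with
  | nil => simp
  | cons a l ih =>
    rw [List.map_cons, List.sum_cons, ih, List.sum_cons]
    push_cast
    ring

theorem stable_counting_sort_by_y_spec : Claim_equal_stable_counting_sort_by_y := by
  unfold Claim_equal_stable_counting_sort_by_y Spec_stable_counting_sort_by_y
    Pre_stable_counting_sort_by_y
  intro coords _ hpre
  obtain ⟨hne, hbound⟩ := hpre
  unfold stable_counting_sort_by_y stable_counting_sort_by_y_alt
  cases hmax : PySem.List.max? coords (fun p => p.2) with
  | none => exact absurd ((PySem.List.max?_eq_none_iff coords (fun p => p.2)).mp hmax) hne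
  | some m =>
    have hmem := PySem.List.max?_mem hmax
    have hmaxle := PySem.List.max?_isMax hmax
    have hm0 : 0 ≤ m.2 := by
      obtain ⟨q, hq, hq2⟩ := hbound m hmem
      have := hmaxle q hq
      omega
    set M : Nat := (m.2 + 1).toNat with hMdef
    have hMnat : ((M : Nat) : Int) = m.2 + 1 := Int.toNat_of_nonneg (by omega)
    have hM : 0 < M := by omega
    have hyM : ∀ p ∈ coords, -(M : Int) ≤ p.2 ∧ p.2 < (M : Int) := by
      intro p hp
      obtain ⟨q, hq, hq2⟩ := hbound p hp
      have h1 := hmaxle q hq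
      have h2 := hmaxle p hp
      constructor <;> omega
    have hslotlt : ∀ p ∈ coords, pvSlot M p.2 < M := fun p hp =>
      pvSlot_lt M p.2 (hyM p hp).1 (hyM p hp).2 hM
    have hsum : pvC M coords M = coords.length := pvSumCnt M coords hslotlt
    show (coords.reverse.foldl pvStepA
        (List.replicate coords.length ((0 : Int), (0 : Int)),
         (PySem.List.pyRange 1 (m.2 + 1)).foldl
           (fun c i => PySem.List.pySetD c i (PySem.List.pyGetD c i 0 + PySem.List.pyGetD c (i - 1) 0))
           (coords.foldl (fun c p => PySem.List.pySetD c p.2 (PySem.List.pyGetD c p.2 0 + 1))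
             (List.replicate M 0)))).1
      = (coords.foldl (fun bs p => PySem.List.pySetD bs p.2 (PySem.List.pyGetD bs p.2 [] ++ [p]))
          (List.replicate M [])).flatten
    rw [show (m.2 + 1) = ((M : Nat) : Int) from hMnat.symm]
    -- A: counting loop
    obtain ⟨hc1len, hc1⟩ := pvL2 M hM coords (List.replicate M 0) (by simp) hyM
    set count1 : List Int := coords.foldl
      (fun c p => PySem.List.pySetD c p.2 (PySem.List.pyGetD c p.2 0 + 1))
      (List.replicate M 0) with hcount1
    have hc1' : ∀ s, s < M → count1.getD s 0 = (pvCnt M s coords : Int) := by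
      intro s hs
      rw [hc1 s hs, List.getD_eq_getElem?_getD, List.getElem?_replicate]
      simp [hs]
    -- A: prefix-sum loop
    obtain ⟨hc2len, hc2in, _⟩ := pvL3 count1 M (by omega)
    set count2 : List Int := (PySem.List.pyRange 1 ((M : Nat) : Int)).foldl
      (fun c i => PySem.List.pySetD c i (PySem.List.pyGetD c i 0 + PySem.List.pyGetD c (i - 1) 0))
      count1 with hcount2
    set D : Nat → Int := fun s => (pvC M coords s : Int) with hD
    have hcD : ∀ s, s < M → count2.getD s 0 = D s + (pvCnt M s coords : Int) := by
      intro s hs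
      rw [hc2in s hs]
      have hcong : (List.range (s + 1)).map (fun t => count1.getD t 0)
          = (List.range (s + 1)).map (fun t => (pvCnt M t coords : Int)) := by
        apply List.map_congr_left
        intro t ht
        have htM : t < M := by
          have := List.mem_range.mp ht
          omega
        exact hc1' t htM
      rw [hcong]
      have hcast : (List.range (s + 1)).map (fun t => (pvCnt M t coords : Int))
          = ((List.range (s + 1)).map (fun t => pvCnt M t coords)).map (Nat.cast : Nat → Int) := by
        rw [List.map_map]
        rfl
      rw [hcast, pvCastSum]
      have : ((List.range (s + 1)).map (fun t => pvCnt M t coords)).sum = pvC M coords (s + 1) := rfl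
      rw [this]
      simp only [hD]
      have := pvC_succ M coords s
      push_cast [this]
      ring
    have hc2len' : count2.length = M := by rw [hc2len, hc1len]
    have hCsucc : ∀ s : Nat, (pvC M coords (s + 1) : Int) = D s + (pvCnt M s coords : Int) := by
      intro s
      simp only [hD]
      have := pvC_succ M coords s
      push_cast [this]
      ring
    obtain ⟨hst2len, hst1len, hstc, hstseg, hstoth⟩ :=
      pvL4 M hM coords (List.replicate coords.length ((0 : Int), (0 : Int))) count2 D hc2len' hyM
        hcD
        (by
          intro s t hs ht hnest i hcontra
          obtain ⟨h1, h2, h3, h4⟩ := hcontra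
          rcases Nat.lt_or_ge s t with hlt | hge
          · have hmono : pvC M coords (s + 1) ≤ pvC M coords t := pvC_mono M coords hlt
            have e1 : (pvC M coords (s + 1) : Int) ≤ (pvC M coords t : Int) := by exact_mod_cast hmono
            have e2 := hCsucc s
            have e3 : D t = (pvC M coords t : Int) := by simp only [hD]
            omega
          · have hlt' : t < s := by omega
            have hmono : pvC M coords (t + 1) ≤ pvC M coords s := pvC_mono M coords hlt'
            have e1 : (pvC M coords (t + 1) : Int) ≤ (pvC M coords s : Int) := by exact_mod_cast hmono
            have e2 := hCsucc t
            have e3 : D s = (pvC M coords s : Int) := by simp only [hD]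
            omega)
        (by
          intro s hs _
          constructor
          · simp only [hD]; exact Int.natCast_nonneg _
          · have hmono : pvC M coords (s + 1) ≤ pvC M coords M := pvC_mono M coords (by omega)
            have e1 : (pvC M coords (s + 1) : Int) ≤ (pvC M coords M : Int) := by exact_mod_cast hmono
            have e2 := hCsucc s
            rw [List.length_replicate, ← hsum]
            omega)
    -- B: bucket distribution loop
    obtain ⟨hblen, hbv⟩ := pvL1 M hM coords (List.replicate M []) (by simp) hyM
    set buckets : List (List (Int × Int)) := coords.foldl
      (fun bs p => PySem.List.pySetD bs p.2 (PySem.List.pyGetD bs p.2 [] ++ [p]))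
      (List.replicate M []) with hbk
    have hbv' : ∀ s, s < M → buckets.getD s [] = pvBucket M s coords := by
      intro s hs
      rw [hbv s hs, List.getD_eq_getElem?_getD, List.getElem?_replicate]
      simp [hs]
    have hbuckets_eq : buckets = (List.range M).map (fun s => pvBucket M s coords) := by
      apply List.ext_getElem
      · simp [hblen]
      · intro k h1 h2
        have hkM : k < M := by rw [hblen] at h1; exact h1
        rw [List.getElem_map, List.getElem_range,
          ← List.getD_eq_getElem buckets [] h1]
        exact hbv' k hkM
    have hbsum : (buckets.map List.length).sum = coords.length := by
      rw [hbuckets_eq, List.map_map]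
      have hcong : (List.range M).map (List.length ∘ fun s => pvBucket M s coords)
          = (List.range M).map (fun s => pvCnt M s coords) := by
        apply List.map_congr_left
        intro t _
        simp [Function.comp, pvCnt_eq_len]
      rw [hcong]
      have : ((List.range M).map (fun s => pvCnt M s coords)).sum = pvC M coords M := rfl
      rw [this, hsum]
    -- stitch the A output together from the buckets
    apply pvFlattenSeg
    · rw [hst1len, List.length_replicate, hbsum]
    · intro k hk
      have hkM : k < M := by rw [hblen] at hk; exact hk
      have hoff : ((buckets.take k).map List.length).sum = pvC M coords k := by
        rw [hbuckets_eq, ← List.map_take, List.take_range, Nat.min_eq_left (le_of_lt hkM),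
          List.map_map]
        have hcong : (List.range k).map (List.length ∘ fun s => pvBucket M s coords)
            = (List.range k).map (fun s => pvCnt M s coords) := by
          apply List.map_congr_left
          intro t _
          simp [Function.comp, pvCnt_eq_len]
        rw [hcong]
        rfl
      have hgd : buckets.getD k [] = pvBucket M k coords := hbv' k hkM
      rw [hoff, hgd]
      have hlen1 : (coords.reverse.foldl pvStepA
          (List.replicate coords.length ((0 : Int), (0 : Int)), count2)).1.length
          = coords.length := by
        rw [hst1len, List.length_replicate]
      have hCk : pvC M coords k + pvCnt M k coords ≤ coords.length := by
        have h1 : pvC M coords (k + 1) ≤ pvC M coords M := pvC_mono M coords (by omega)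
        have h2 := pvC_succ M coords k
        omega
      apply List.ext_getElem
      · rw [List.length_take, List.length_drop, hlen1, ← pvCnt_eq_len]
        omega
      · intro j hj1 hj2
        have hjlt : j < pvCnt M k coords := by
          rw [pvCnt_eq_len]
          exact hj2
        have hseg := hstseg k hkM j hjlt
        have harith : (D k + (j : Int)).toNat = pvC M coords k + j := by
          simp only [hD]
          omega
        rw [harith] at hseg
        have hidx : pvC M coords k + j < (coords.reverse.foldl pvStepA
            (List.replicate coords.length ((0 : Int), (0 : Int)), count2)).1.length := by
          rw [hlen1]; omega
        rw [List.getD_eq_getElem _ _ hidx,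
          List.getD_eq_getElem _ _ (by rw [← pvCnt_eq_len]; exact hjlt)] at hseg
        rw [List.getElem_take, List.getElem_drop]
        exact hseg
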